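-- pv_equiv track=rewrite | github.com/jamescalnan/BIO-olympiad | bio_2023_q2.py | touching
-- ===== SOURCE A (Python) =====
-- def touching(first_pento, second_pento):
--     for point in first_pento:
--         if (point[0] + 1, point[1]) in second_pento:
--             return True
--         if (point[0] - 1, point[1]) in second_pento:
--             return True
--         if (point[0], point[1] + 1) in second_pento:
--             return True
--         if (point[0], point[1] - 1) in second_pento:
--             return True
--     return False
-- ===== SOURCE B (Python) =====
-- def touching(first_pento, second_pento):
--     return any(abs(p[0] - q[0]) + abs(p[1] - q[1]) == 1
--                for p in first_pento for q in second_pento)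
-- ===== Notes on version B (the rewrite author's own statement) =====
-- stated objective: idiomatic
-- what changed: Instead of generating each point's four neighbours and testing membership in second_pento, B scans all pairs and tests Manhattan distance == 1 via an any() over a generator.
import Mathlib
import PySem

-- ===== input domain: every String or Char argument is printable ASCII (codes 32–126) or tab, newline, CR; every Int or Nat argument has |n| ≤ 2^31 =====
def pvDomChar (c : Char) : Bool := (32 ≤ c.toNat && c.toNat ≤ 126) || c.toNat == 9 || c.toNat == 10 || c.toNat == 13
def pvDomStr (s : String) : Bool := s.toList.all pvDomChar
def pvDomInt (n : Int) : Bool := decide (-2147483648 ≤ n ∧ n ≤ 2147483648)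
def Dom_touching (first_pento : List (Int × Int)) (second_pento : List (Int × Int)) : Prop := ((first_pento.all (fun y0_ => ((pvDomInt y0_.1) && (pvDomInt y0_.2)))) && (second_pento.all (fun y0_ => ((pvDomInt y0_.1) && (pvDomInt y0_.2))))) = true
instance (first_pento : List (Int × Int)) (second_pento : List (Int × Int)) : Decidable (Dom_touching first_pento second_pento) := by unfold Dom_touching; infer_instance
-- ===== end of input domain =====

-- B replaces the four-neighbour membership test with a pairwise Manhattan-distance-1 scan (idiomatic any()); same cost, no speed claim.


-- ===== PORT A =====
-- For each point of first_pento, test membership of its four neighbours in second_pento,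
-- returning True at the first hit (early return = List.any).
def touching (first_pento : List (Int × Int)) (second_pento : List (Int × Int)) : Bool :=
  first_pento.any (fun point =>
    decide ((point.1 + 1, point.2) ∈ second_pento) ||
    decide ((point.1 - 1, point.2) ∈ second_pento) ||
    decide ((point.1, point.2 + 1) ∈ second_pento) ||
    decide ((point.1, point.2 - 1) ∈ second_pento))

-- ===== PORT B =====
-- B: any pair (p, q) at Manhattan distance exactly 1.
def touching_alt (first_pento : List (Int × Int)) (second_pento : List (Int × Int)) : Bool :=
  first_pento.any (fun p =>
    second_pento.any (fun q =>
      (p.1 - q.1).natAbs + (p.2 - q.2).natAbs == 1))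

-- ===== PRECONDITION & SPEC =====
def Spec_touching (first_pento : List (Int × Int)) (second_pento : List (Int × Int)) (out : Bool) : Prop := out = touching_alt first_pento second_pento
instance (first_pento : List (Int × Int)) (second_pento : List (Int × Int)) (out : Bool) : Decidable (Spec_touching first_pento second_pento out) := by unfold Spec_touching; infer_instance

-- ===== CLAIM (what is proved, stated in full; the proofs are below) =====
def Claim_equal_touching : Prop := ∀ (first_pento : List (Int × Int)) (second_pento : List (Int × Int)), Dom_touching first_pento second_pento → Spec_touching first_pento second_pento (touching first_pento second_pento)

-- ===== LEMMAS AND PROOFS =====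

-- ===== VERDICT (by name: the statement is the Claim_ definition above) =====
theorem touching_spec : Claim_equal_touching := by
  intro f s _
  unfold Spec_touching touching touching_alt
  rw [Bool.eq_iff_iff]
  simp only [List.any_eq_true, Bool.or_eq_true, decide_eq_true_eq, beq_iff_eq]
  constructor
  · rintro ⟨⟨px, py⟩, hp, h⟩
    rcases h with ((h | h) | h) | h
    · exact ⟨(px, py), hp, (px + 1, py), h, by simp⟩
    · exact ⟨(px, py), hp, (px - 1, py), h, by simp⟩
    · exact ⟨(px, py), hp, (px, py + 1), h, by simp⟩
    · exact ⟨(px, py), hp, (px, py - 1), h, by simp⟩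
  · rintro ⟨⟨px, py⟩, hp, ⟨qx, qy⟩, hq, hd⟩
    simp only at hd
    refine ⟨(px, py), hp, ?_⟩
    have hcase : (qx = px + 1 ∧ qy = py) ∨ (qx = px - 1 ∧ qy = py) ∨
        (qx = px ∧ qy = py + 1) ∨ (qx = px ∧ qy = py - 1) := by omega
    rcases hcase with ⟨h1, h2⟩ | ⟨h1, h2⟩ | ⟨h1, h2⟩ | ⟨h1, h2⟩ <;>
      subst h1 <;> subst h2 <;> simp_all
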